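-- pv_equiv track=rewrite | github.com/alxwen711/contestSubmissionArchive | codeforces/live contests/2025-4/e183/d.py | invcount
-- ===== SOURCE A (Python) =====
-- def f(ar):
--     for i in range(len(ar)-1):
--         if ar[i] > ar[i+1]: return True
--     return False
--
-- def invcount(n,ar):
--     ans = 0
--     for a in range(n-1):
--         for b in range(a+1,n):
--             if f(ar[a:b+1]):
--                 ans += n-b
--                 break
--     return ans
-- ===== SOURCE B (Python) =====
-- def invcount(n, ar):
--     # One right-to-left pass: maintain cur = index of first adjacent descent at or
--     # after the current position; each position a <= n-2 contributes n-1-cur when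
--     # that descent fits before index n-1.
--     m = len(ar)
--     ans = 0
--     cur = -1
--     for j in range(m - 2, -1, -1):
--         if ar[j] > ar[j + 1]:
--             cur = j
--         if j <= n - 2 and cur != -1 and cur <= n - 2:
--             ans += n - 1 - cur
--     return ans
-- ===== Notes on version B (the rewrite author's own statement) =====
-- stated objective: faster
-- what changed: Replaces A's triple nesting (for every start a, scan endpoints b and re-run the descent test f on each slice) by a single right-to-left pass that maintains the index of the nearest adjacent descent and accumulates each start's contribution directly.
import Mathlib
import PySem

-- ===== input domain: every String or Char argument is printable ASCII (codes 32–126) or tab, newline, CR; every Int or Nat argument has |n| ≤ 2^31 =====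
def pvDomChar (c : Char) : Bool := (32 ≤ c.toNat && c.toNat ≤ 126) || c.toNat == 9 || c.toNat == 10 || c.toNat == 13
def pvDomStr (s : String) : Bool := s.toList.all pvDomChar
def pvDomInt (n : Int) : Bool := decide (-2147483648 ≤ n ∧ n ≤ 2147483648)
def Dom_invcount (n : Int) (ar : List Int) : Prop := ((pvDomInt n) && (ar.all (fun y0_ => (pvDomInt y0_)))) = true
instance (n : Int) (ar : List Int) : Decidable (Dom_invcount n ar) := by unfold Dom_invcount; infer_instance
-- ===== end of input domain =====

-- B replaces A's cubic triple scan by one right-to-left pass that tracks the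
-- nearest adjacent-descent index (objective: faster, asymptotic).

-- ===== PORT A =====
-- f: scan adjacent pairs, early-return True on a descent
def fA : List Int → Bool
  | x :: y :: rest => if x > y then true else fA (y :: rest)
  | _ => false

-- inner 'for b in range(a+1, n)' loop with its break (returns 0 if no break fires)
def innerA (n : Int) (ar : List Int) (a : Int) : List Int → Int
  | [] => 0
  | b :: bs =>
      if fA (PySem.List.slice ar (some a) (some (b + 1))) then n - b
      else innerA n ar a bs

def invcount (n : Int) (ar : List Int) : Int :=
  (PySem.List.pyRange 0 (n - 1) 1).foldl
    (fun ans a => ans + innerA n ar a (PySem.List.pyRange (a + 1) n 1)) 0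

-- ===== PORT B =====
-- the right-to-left loop of Source B as structural recursion (innermost call = largest j);
-- returns (cur, ans); j is the absolute index of the current head, j = m - length
def goB (n m : Int) : List Int → Int × Int
  | x :: y :: rest =>
      let p := goB n m (y :: rest)
      let j : Int := m - 2 - (rest.length : Int)
      let cur : Int := if x > y then j else p.1
      (cur, if j ≤ n - 2 ∧ cur ≠ -1 ∧ cur ≤ n - 2 then p.2 + (n - 1 - cur) else p.2)
  | _ => (-1, 0)

def invcount_alt (n : Int) (ar : List Int) : Int := (goB n (ar.length : Int) ar).2

-- ===== PRECONDITION & SPEC =====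
def Spec_invcount (n : Int) (ar : List Int) (out : Int) : Prop := out = invcount_alt n ar
instance (n : Int) (ar : List Int) (out : Int) : Decidable (Spec_invcount n ar out) := by unfold Spec_invcount; infer_instance

-- ===== CLAIM (what is proved, stated in full; the proofs are below) =====
def Claim_equal_invcount : Prop := ∀ (n : Int) (ar : List Int), Dom_invcount n ar → Spec_invcount n ar (invcount n ar)

-- ===== LEMMAS AND PROOFS =====

-- relative index of the first adjacent descent in a list, if any
def fdN : List Int → Option Nat
  | x :: y :: rest => if x > y then some 0 else (fdN (y :: rest)).map (· + 1)
  | _ => none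

-- contribution of one start index a (absolute), as A computes it
def G (n : Int) (ar : List Int) (a : Int) : Int :=
  match fdN (ar.drop a.toNat) with
  | some r => if a + (r : Int) + 1 ≤ n - 1 then n - (a + (r : Int) + 1) else 0
  | none => 0

theorem fdN_short {l : List Int} (h : l.length ≤ 1) : fdN l = none := by
  match l, h with
  | [], _ => rfl
  | [x], _ => rfl

theorem fA_take (l : List Int) : ∀ (k : Nat),
    fA (l.take k) = (match fdN l with
      | some r => decide (r + 2 ≤ k)
      | none => false) := by
  induction l with
  | nil => intro k; simp [fdN, fA]
  | cons x t ih =>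
    intro k
    match t with
    | [] =>
      match k with
      | 0 => simp [fdN, fA]
      | k + 1 => simp [fdN, fA]
    | y :: rest =>
      match k with
      | 0 => cases h : fdN (x :: y :: rest) <;> simp [fA]
      | 1 =>
        cases h : fdN (x :: y :: rest) with
        | none => simp [fA]
        | some r =>
          have hr : ¬ (r + 2 ≤ 1) := by omega
          simp [fA, hr]
      | k + 2 =>
        simp only [List.take_succ_cons, fA, fdN]
        by_cases hxy : x > y
        · simp [hxy]
        · simp only [if_neg hxy]
          have := ih (k + 1)
          simp only [List.take_succ_cons] at this ⊢
          rw [this]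
          cases fdN (y :: rest) with
          | none => simp
          | some r =>
            simp only [Option.map_some]
            have hiff : (r + 2 ≤ k + 1) ↔ (r + 1 + 2 ≤ k + 2) := by omega
            rw [decide_eq_decide.2 hiff]

theorem drop_drop_int (ar l : List Int) (j0 a : Int) (hl : l = ar.drop j0.toNat)
    (ha : j0 ≤ a) : ar.drop a.toNat = l.drop (a.toNat - j0.toNat) := by
  subst hl; rw [List.drop_drop]; congr 1; omega

theorem innerA_spec (n : Int) (ar : List Int) (a : Int) (ha : 0 ≤ a) :
    ∀ (k : Nat) (b : Int), a < b → (n - b).toNat = k →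
    (∀ r : Nat, fdN (ar.drop a.toNat) = some r → b ≤ a + (r : Int) + 1) →
    innerA n ar a (PySem.List.pyRange b n 1) =
      (match fdN (ar.drop a.toNat) with
       | some r => if a + (r : Int) + 1 ≤ n - 1 then n - (a + (r : Int) + 1) else 0
       | none => 0) := by
  intro k
  induction k with
  | zero =>
    intro b hab hk hb
    have hbn : n ≤ b := by omega
    rw [PySem.List.pyRange_one_eq_nil hbn]
    cases hfd : fdN (ar.drop a.toNat) with
    | none => simp [innerA]
    | some r =>
      have := hb r hfd
      simp [innerA]
      omega
  | succ k ih =>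
    intro b hab hk hb
    have hbn : b < n := by omega
    rw [PySem.List.pyRange_one_cons hbn]
    have hb1 : (0:Int) ≤ b + 1 := by omega
    have hslice : PySem.List.slice ar (some a) (some (b + 1)) =
        (ar.drop a.toNat).take ((b + 1).toNat - a.toNat) :=
      PySem.List.slice_toNat ar ha hb1
    cases hfd : fdN (ar.drop a.toNat) with
    | none =>
      have hfa : fA (PySem.List.slice ar (some a) (some (b + 1))) = false := by
        rw [hslice, fA_take, hfd]
      simp only [innerA, hfa, Bool.false_eq_true, if_false]
      have h2 := ih (b + 1) (by omega) (by omega) (by intro r hr; rw [hr] at hfd; cases hfd)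
      rw [hfd] at h2
      exact h2
    | some r =>
      have hble := hb r hfd
      by_cases hhit : b = a + (r : Int) + 1
      · have hfa : fA (PySem.List.slice ar (some a) (some (b + 1))) = true := by
          rw [hslice, fA_take, hfd]; simp; omega
        simp only [innerA, hfa, if_true]
        rw [if_pos (by omega : a + (r : Int) + 1 ≤ n - 1)]
        omega
      · have hblt : b < a + (r : Int) + 1 := by omega
        have hfa : fA (PySem.List.slice ar (some a) (some (b + 1))) = false := by
          rw [hslice, fA_take, hfd]; simp; omega
        simp only [innerA, hfa, Bool.false_eq_true, if_false]
        have h2 := ih (b + 1) (by omega) (by omega)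
          (by intro r' hr'; rw [hr'] at hfd; cases hfd; omega)
        rw [hfd] at h2
        exact h2

theorem G_of_inner (n : Int) (ar : List Int) (a : Int) (ha : 0 ≤ a) :
    innerA n ar a (PySem.List.pyRange (a + 1) n 1) = G n ar a := by
  have := innerA_spec n ar a ha (n - (a + 1)).toNat (a + 1) (by omega) rfl
    (by intro r hr; omega)
  rw [this]; rfl

-- encoded first-descent index at absolute offset j0 (−1 = none), as B's cur
def encFd (j0 : Int) (l : List Int) : Int :=
  match fdN l with
  | some r => j0 + (r : Int)
  | none => -1

theorem goB_fst (n m : Int) : ∀ (l : List Int), (goB n m l).1 = encFd (m - (l.length : Int)) l := by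
  intro l
  induction l with
  | nil => simp [goB, encFd, fdN]
  | cons x t ih =>
    match t with
    | [] => simp [goB, encFd, fdN]
    | y :: rest =>
      simp only [goB]
      by_cases hxy : x > y
      · simp only [encFd, fdN, if_pos hxy]
        simp [List.length_cons]; ring
      · simp only [encFd, fdN, if_neg hxy]
        rw [ih]
        simp only [encFd]
        cases fdN (y :: rest) with
        | none => simp
        | some r => simp only [Option.map_some, List.length_cons]; push_cast; ring

theorem sum_G_zero (n : Int) (ar : List Int) (L : List Int)
    (hz : ∀ a ∈ L, G n ar a = 0) : (L.map (G n ar)).sum = 0 :=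
  List.sum_eq_zero (by intro x hx; obtain ⟨a, ha, rfl⟩ := List.mem_map.1 hx; exact hz a ha)

-- B's partial answer over a suffix equals the per-start contribution sum
theorem goB_snd (n : Int) (ar : List Int) : ∀ (l : List Int) (j0 : Int), 0 ≤ j0 →
    l = ar.drop j0.toNat → (j0 + (l.length : Int) = (ar.length : Int)) →
    (goB n (ar.length : Int) l).2 =
      ((PySem.List.pyRange j0 (n - 1) 1).map (G n ar)).sum := by
  intro l
  induction l with
  | nil =>
    intro j0 hj0 hl hm
    simp only [goB]
    refine (sum_G_zero n ar _ ?_).symm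
    intro a hamem
    have hmem := (PySem.List.mem_pyRange_one).1 hamem
    have : ar.drop a.toNat = [] := by
      rw [drop_drop_int ar [] j0 a hl hmem.1]; simp
    simp [G, this, fdN]
  | cons x t ih =>
    intro j0 hj0 hl hm
    match t with
    | [] =>
      simp only [goB]
      refine (sum_G_zero n ar _ ?_).symm
      intro a hamem
      have hmem := (PySem.List.mem_pyRange_one).1 hamem
      have hdrop := drop_drop_int ar [x] j0 a hl hmem.1
      have : (ar.drop a.toNat).length ≤ 1 := by rw [hdrop]; simp
      simp [G, fdN_short this]
    | y :: rest =>
      have hj : (ar.length : Int) - 2 - (rest.length : Int) = j0 := by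
        simp only [List.length_cons] at hm; push_cast at hm ⊢; omega
      have htail : (y :: rest) = ar.drop (j0 + 1).toNat := by
        have h1 : (j0 + 1).toNat = j0.toNat + 1 := by omega
        rw [h1, ← List.drop_drop, ← hl]; rfl
      have hmtail : (j0 + 1) + ((y :: rest).length : Int) = (ar.length : Int) := by
        simp only [List.length_cons] at hm ⊢; push_cast at hm ⊢; omega
      have ihy := ih (j0 + 1) (by omega) htail hmtail
      simp only [goB, hj]
      rw [goB_fst]
      have hlen : (ar.length : Int) - ((y :: rest).length : Int) = j0 + 1 := by
        push_cast at hmtail ⊢; omega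
      rw [hlen]
      have hcur : (if x > y then j0 else encFd (j0 + 1) (y :: rest)) = encFd j0 (x :: y :: rest) := by
        simp only [encFd, fdN]
        by_cases hxy : x > y
        · simp [hxy]
        · simp only [if_neg hxy]
          cases fdN (y :: rest) with
          | none => simp
          | some r => simp only [Option.map_some]; push_cast; ring
      rw [hcur, ihy]
      by_cases hrange : j0 < n - 1
      · rw [PySem.List.pyRange_one_cons hrange, List.map_cons, List.sum_cons]
        have hG : G n ar j0 = (if j0 ≤ n - 2 ∧ encFd j0 (x :: y :: rest) ≠ -1 ∧
            encFd j0 (x :: y :: rest) ≤ n - 2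
            then n - 1 - encFd j0 (x :: y :: rest) else 0) := by
          have hdropj : ar.drop j0.toNat = x :: y :: rest := hl.symm
          simp only [G, encFd, hdropj]
          cases fdN (x :: y :: rest) with
          | none => simp
          | some r =>
            simp only
            have hr0 : (0:Int) ≤ (r:Int) := by positivity
            by_cases hc : j0 + (r : Int) + 1 ≤ n - 1
            · rw [if_pos hc, if_pos ⟨by omega, by omega, by omega⟩]; ring
            · rw [if_neg hc, if_neg (by intro h; omega)]
        rw [hG]
        split <;> ring
      · rw [PySem.List.pyRange_one_eq_nil (by omega : n - 1 ≤ j0),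
            PySem.List.pyRange_one_eq_nil (by omega : n - 1 ≤ j0 + 1)]
        simp only [List.map_nil, List.sum_nil]
        rw [if_neg (by intro h; omega)]

theorem invcount_eq_sum (n : Int) (ar : List Int) :
    invcount n ar = ((PySem.List.pyRange 0 (n - 1) 1).map (G n ar)).sum := by
  unfold invcount
  rw [PySem.List.foldl_add, zero_add]
  congr 1
  apply List.map_congr_left
  intro a hmem
  exact G_of_inner n ar a ((PySem.List.mem_pyRange_one).1 hmem).1

-- ===== VERDICT (by name: the statement is the Claim_ definition above) =====
theorem invcount_spec : Claim_equal_invcount := by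
  intro n ar _
  unfold Spec_invcount invcount_alt
  rw [goB_snd n ar ar (0 : Int) le_rfl (by simp) (by simp), invcount_eq_sum]
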